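-- pv_equiv track=rewrite | github.com/Yeongseo-Kim/k-youtube | src/uploader.py | _trim_tags
-- ===== SOURCE A (Python) =====
-- def _trim_tags(tags_str: str, max_chars: int = 500) -> list[str]:
--     """태그 문자열을 YouTube API 500자 제한에 맞게 잘라 리스트로 반환"""
--     tags = [t.strip() for t in tags_str.split(",") if t.strip()]
--     result, total = [], 0
--     for tag in tags:
--         if total + len(tag) + (1 if result else 0) > max_chars:
--             break
--         result.append(tag)
--         total += len(tag) + (1 if len(result) > 1 else 0)
--     return result
-- ===== SOURCE B (Python) =====
-- def _trim_tags(tags_str: str, max_chars: int = 500) -> list[str]: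
--     """태그 문자열을 YouTube API 500자 제한에 맞게 잘라 리스트로 반환"""
--     tags = [t.strip() for t in tags_str.split(",") if t.strip()]
--     # cumulative length table: cum[i] == len(",".join(tags[:i+1]))
--     cum = []
--     n = 0
--     for t in tags:
--         n += len(t) + (1 if cum else 0)
--         cum.append(n)
--     # cum is strictly increasing, so the kept prefix is exactly the entries <= max_chars
--     k = sum(1 for c in cum if c <= max_chars)
--     return tags[:k]
-- ===== Notes on version B (the rewrite author's own statement) =====
-- stated objective: alternative
-- what changed: Replaces the running-accumulator loop with an early break by building a cumulative comma-join-length table, counting how many table entries fit in max_chars, and slicing the tag list to that count.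
import Mathlib
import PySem

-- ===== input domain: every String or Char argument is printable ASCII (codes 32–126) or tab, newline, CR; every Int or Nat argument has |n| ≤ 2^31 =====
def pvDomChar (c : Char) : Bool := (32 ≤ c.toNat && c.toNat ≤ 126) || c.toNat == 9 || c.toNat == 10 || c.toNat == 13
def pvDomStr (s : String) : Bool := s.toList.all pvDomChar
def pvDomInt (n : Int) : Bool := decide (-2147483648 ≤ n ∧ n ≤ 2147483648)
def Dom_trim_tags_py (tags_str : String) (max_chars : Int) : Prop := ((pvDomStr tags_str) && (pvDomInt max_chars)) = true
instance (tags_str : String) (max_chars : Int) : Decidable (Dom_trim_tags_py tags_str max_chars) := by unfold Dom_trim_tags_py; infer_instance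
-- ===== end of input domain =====

-- B builds a cumulative comma-join-length table and slices; A scans with a running total and an early break. Equivalent on all inputs.

-- shared cleaning step (identical line in both Pythons):
-- [t.strip() for t in tags_str.split(",") if t.strip()]
def pvCleanTags (tags_str : String) : List String :=
  ((PySem.Str.split? tags_str ",").getD []).filterMap
    (fun t => let s := PySem.Str.strip t; if s = "" then none else some s)

-- ===== PORT A =====
-- the for-loop with break: state (result, total)
def pvLoopA (max_chars : Int) : List String → List String → Int → List String
  | [], result, _ => result
  | tag :: rest, result, total =>
    if total + PySem.Str.len tag + (if result.length > 0 then 1 else 0) > max_chars then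
      result
    else
      pvLoopA max_chars rest (result ++ [tag])
        (total + PySem.Str.len tag + (if (result ++ [tag]).length > 1 then 1 else 0))

def trim_tags_py (tags_str : String) (max_chars : Int) : List String :=
  pvLoopA max_chars (pvCleanTags tags_str) [] 0

-- ===== PORT B =====
-- the table-building loop: state (cum, n); cum.getLast? replaced by carrying n as in Source B
def pvBuildCum : List String → List Int → Int → List Int
  | [], cum, _ => cum
  | t :: rest, cum, n =>
    let n' := n + PySem.Str.len t + (if cum.length > 0 then 1 else 0)
    pvBuildCum rest (cum ++ [n']) n'

def trim_tags_py_alt (tags_str : String) (max_chars : Int) : List String :=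
  let tags := pvCleanTags tags_str
  let cum := pvBuildCum tags [] 0
  -- sum(1 for c in cum if c <= max_chars)
  let k := cum.countP (fun c => decide (c ≤ max_chars))
  tags.take k

-- ===== PRECONDITION & SPEC =====
def Spec_trim_tags_py (tags_str : String) (max_chars : Int) (out : List String) : Prop := out = trim_tags_py_alt tags_str max_chars
instance (tags_str : String) (max_chars : Int) (out : List String) : Decidable (Spec_trim_tags_py tags_str max_chars out) := by unfold Spec_trim_tags_py; infer_instance

-- ===== CLAIM (what is proved, stated in full; the proofs are below) =====
def Claim_equal_trim_tags_py : Prop := ∀ (tags_str : String) (max_chars : Int), Dom_trim_tags_py tags_str max_chars → Spec_trim_tags_py tags_str max_chars (trim_tags_py tags_str max_chars)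

-- ===== LEMMAS AND PROOFS =====

-- common abstraction: greedy prefix with separator flag
def pvGreedy (mc : Int) : List String → Int → Bool → List String
  | [], _, _ => []
  | t :: rest, n, sep =>
    let c := n + PySem.Str.len t + (if sep then 1 else 0)
    if c > mc then [] else t :: pvGreedy mc rest c true

theorem loopA_eq_greedy (mc : Int) (tags : List String) :
    ∀ (res : List String) (n : Int),
      pvLoopA mc tags res n = res ++ pvGreedy mc tags n (res.length > 0) := by
  induction tags with
  | nil => intro res n; simp [pvLoopA, pvGreedy]
  | cons t rest ih =>
    intro res n
    have eA : pvLoopA mc (t :: rest) res n =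
        if n + PySem.Str.len t + (if res.length > 0 then (1 : Int) else 0) > mc then res
        else pvLoopA mc rest (res ++ [t])
          (n + PySem.Str.len t + (if (res ++ [t]).length > 1 then 1 else 0)) := rfl
    have eG : pvGreedy mc (t :: rest) n (decide (res.length > 0)) =
        if n + PySem.Str.len t + (if decide (res.length > 0) = true then (1 : Int) else 0) > mc
        then []
        else t :: pvGreedy mc rest
          (n + PySem.Str.len t + (if decide (res.length > 0) = true then 1 else 0)) true := rfl
    have hd : (if decide (res.length > 0) = true then (1 : Int) else 0)
        = (if res.length > 0 then 1 else 0) := by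
      by_cases hr : res.length > 0 <;> simp [hr]
    rw [eA, eG, hd]
    by_cases h : n + PySem.Str.len t + (if res.length > 0 then (1 : Int) else 0) > mc
    · rw [if_pos h, if_pos h, List.append_nil]
    · rw [if_neg h, if_neg h]
      have hsep : (if (res ++ [t]).length > 1 then (1 : Int) else 0)
          = (if res.length > 0 then 1 else 0) := by
        simp only [List.length_append, List.length_cons, List.length_nil]
        split_ifs <;> omega
      rw [hsep, ih]
      have hne : decide ((res ++ [t]).length > 0) = true := by simp
      rw [hne]
      simp

def pvCumsL (n : Int) (sep : Bool) : List String → List Int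
  | [] => []
  | t :: rest =>
    let c := n + PySem.Str.len t + (if sep then 1 else 0)
    c :: pvCumsL c true rest

theorem buildCum_eq_cums (tags : List String) :
    ∀ (cum : List Int) (n : Int),
      pvBuildCum tags cum n = cum ++ pvCumsL n (cum.length > 0) tags := by
  induction tags with
  | nil => intro cum n; simp [pvBuildCum, pvCumsL]
  | cons t rest ih =>
    intro cum n
    simp only [pvBuildCum, pvCumsL]
    rw [ih]
    simp

theorem len_nonneg (t : String) : 0 ≤ PySem.Str.len t := by
  simp [PySem.Str.len_eq]

theorem cums_gt (tags : List String) : ∀ (m : Int), ∀ x ∈ pvCumsL m true tags, m < x := by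
  induction tags with
  | nil => intro m x hx; simp [pvCumsL] at hx
  | cons t rest ih =>
    intro m x hx
    simp only [pvCumsL, if_true, List.mem_cons] at hx
    have hlen := len_nonneg t
    rcases hx with h | h
    · omega
    · have := ih (m + PySem.Str.len t + 1) x h
      omega

theorem take_count_eq_greedy (mc : Int) (tags : List String) :
    ∀ (n : Int) (sep : Bool),
      tags.take ((pvCumsL n sep tags).countP (fun c => decide (c ≤ mc))) = pvGreedy mc tags n sep := by
  induction tags with
  | nil => intro n sep; simp [pvCumsL, pvGreedy]
  | cons t rest ih =>
    intro n sep
    simp only [pvCumsL, pvGreedy]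
    set c := n + PySem.Str.len t + (if sep then (1 : Int) else 0) with hc
    by_cases h : c > mc
    · have hz : (pvCumsL c true rest).countP (fun x => decide (x ≤ mc)) = 0 := by
        rw [List.countP_eq_zero]
        intro x hx
        have := cums_gt rest c x hx
        simp; omega
      simp [h, hz, show ¬ (c ≤ mc) by omega]
    · rw [if_neg h]
      have hcle : c ≤ mc := by omega
      simp [hcle, List.take_succ_cons, ih]

theorem alt_eq (tags_str : String) (mc : Int) :
    trim_tags_py_alt tags_str mc =
      (pvCleanTags tags_str).take
        ((pvBuildCum (pvCleanTags tags_str) [] 0).countP (fun c => decide (c ≤ mc))) := rfl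

-- ===== VERDICT (by name: the statement is the Claim_ definition above) =====
theorem trim_tags_py_spec : Claim_equal_trim_tags_py := by
  intro s mc _
  show trim_tags_py s mc = trim_tags_py_alt s mc
  rw [alt_eq, trim_tags_py, loopA_eq_greedy, buildCum_eq_cums]
  simp [take_count_eq_greedy]
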